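-- pv_equiv track=rewrite | github.com/francesco-mannella/TopologicalAutoencoders | src/topological_autoencoder.py | calculate_layer_sides
-- ===== SOURCE A (Python) =====
-- def calculate_layer_sides(channels, initial_layer_side, kernel=3):
--     """Calculate the layer sides and dimensions.
--
--     Args:
--     - channels (tuple): Number of channels for each layer
--     - initial_layer_side (int): Size of the initial layer side
--     - kernel (int): Kernel size for the ConvAutoencoder
--
--     Returns:
--     - layer_sides (list): List of layer side sizes
--     - toinner_dim (int): Total inner dimension
--     - last_layer_channels (int): Last layer channels
--     - last_layer_side (int): Size of the last layer side
--     """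
--     layer_sides = [initial_layer_side]
--     for channel in channels:
--         new_side = layer_sides[-1] - kernel + 1
--         layer_sides.append(new_side)
--
--     last_layer_side = layer_sides[-1]
--     last_layer_channels = channels[-1]
--     toinner_dim = (last_layer_side**2) * last_layer_channels
--
--     return layer_sides, toinner_dim, last_layer_channels, last_layer_side
-- ===== SOURCE B (Python) =====
-- def calculate_layer_sides(channels, initial_layer_side, kernel=3):
--     """Back-to-front re-implementation: compute the last side first by a closed form,
--     then build the side list in ascending order (adding kernel-1 per step, the running
--     value carried in a variable, never read back from the list) and reverse it."""
--     step = kernel - 1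
--     n = len(channels)
--     last_layer_side = initial_layer_side - n * step
--
--     ascending = []
--     s = last_layer_side
--     for _ in range(n + 1):
--         ascending.append(s)
--         s += step
--     layer_sides = ascending[::-1]
--
--     last_layer_channels = channels[-1]
--     toinner_dim = last_layer_side * last_layer_side * last_layer_channels
--     return layer_sides, toinner_dim, last_layer_channels, last_layer_side
-- ===== Notes on version B (the rewrite author's own statement) =====
-- stated objective: alternative
-- what changed: Computes the last layer side first by a closed form, then builds the side list back-to-front by a recursive ascent adding kernel-1 per step and reverses it, instead of A's forward loop appending a running subtraction read back from the list.
import Mathlib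
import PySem

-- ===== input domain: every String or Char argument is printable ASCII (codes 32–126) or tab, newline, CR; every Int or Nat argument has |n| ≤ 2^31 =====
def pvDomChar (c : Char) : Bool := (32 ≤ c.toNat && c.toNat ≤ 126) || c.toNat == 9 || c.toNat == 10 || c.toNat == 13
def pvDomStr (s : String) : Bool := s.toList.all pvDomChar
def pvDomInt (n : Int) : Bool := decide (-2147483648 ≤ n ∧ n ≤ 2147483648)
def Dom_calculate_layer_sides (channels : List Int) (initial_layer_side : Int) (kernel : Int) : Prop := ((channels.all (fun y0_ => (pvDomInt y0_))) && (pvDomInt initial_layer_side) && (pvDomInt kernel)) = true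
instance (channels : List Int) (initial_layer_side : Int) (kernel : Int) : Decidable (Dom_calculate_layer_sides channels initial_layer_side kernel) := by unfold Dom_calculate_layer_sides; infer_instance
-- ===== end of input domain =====

-- B computes the last side by closed form and builds the side list back-to-front by
-- recursive ascent plus a reverse, instead of A's forward running-subtraction loop
-- (objective: alternative).


-- ===== PORT A =====
def calculate_layer_sides (channels : List Int) (initial_layer_side : Int) (kernel : Int) : List Int × Int × Int × Int :=
  let layer_sides := channels.foldl (fun ls _ => ls ++ [ls.getLast! - kernel + 1]) [initial_layer_side]
  let last_layer_side := layer_sides.getLast!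
  let last_layer_channels := channels.getLast!
  let toinner_dim := last_layer_side ^ 2 * last_layer_channels
  (layer_sides, toinner_dim, last_layer_channels, last_layer_side)

-- ===== PORT B =====
def calculate_layer_sides_alt (channels : List Int) (initial_layer_side : Int) (kernel : Int) : List Int × Int × Int × Int :=
  let step := kernel - 1
  let n : Nat := channels.length
  let last_layer_side := initial_layer_side - (n : Int) * step
  -- B's loop: append the running value s, then bump it by step (s never read back from the list)
  let st := (List.range (n + 1)).foldl
    (fun (st : List Int × Int) _ => (st.1 ++ [st.2], st.2 + step)) ([], last_layer_side)
  let layer_sides := st.1.reverse  -- [::-1]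
  let last_layer_channels := channels.getLast!
  let toinner_dim := last_layer_side * last_layer_side * last_layer_channels
  (layer_sides, toinner_dim, last_layer_channels, last_layer_side)

-- ===== PRECONDITION & SPEC =====
-- Pre_ excludes only channels = [], on which Python A raises IndexError at channels[-1].
def Pre_calculate_layer_sides (channels : List Int) (initial_layer_side : Int) (kernel : Int) : Prop := channels ≠ []
instance (channels : List Int) (initial_layer_side : Int) (kernel : Int) : Decidable (Pre_calculate_layer_sides channels initial_layer_side kernel) := by unfold Pre_calculate_layer_sides; infer_instance
def pvWitness_calculate_layer_sides : List Int × Int × Int := ([3, 5], 16, 3)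

def Spec_calculate_layer_sides (channels : List Int) (initial_layer_side : Int) (kernel : Int) (out : List Int × Int × Int × Int) : Prop := out = calculate_layer_sides_alt channels initial_layer_side kernel
instance (channels : List Int) (initial_layer_side : Int) (kernel : Int) (out : List Int × Int × Int × Int) : Decidable (Spec_calculate_layer_sides channels initial_layer_side kernel out) := by unfold Spec_calculate_layer_sides; infer_instance

-- ===== CLAIM =====
def Claim_equal_calculate_layer_sides : Prop := ∀ (channels : List Int) (initial_layer_side : Int) (kernel : Int), Dom_calculate_layer_sides channels initial_layer_side kernel → Pre_calculate_layer_sides channels initial_layer_side kernel → Spec_calculate_layer_sides channels initial_layer_side kernel (calculate_layer_sides channels initial_layer_side kernel)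

-- ===== LEMMAS AND PROOFS =====

-- closed-form description of the side list after m appends (proof-only helper)
def pvSides (s k : Int) (m : Nat) : List Int := (List.range (m + 1)).map (fun (i : Nat) => s - (i : Int) * (k - 1))

lemma pvSides_getLast! (s k : Int) (m : Nat) : (pvSides s k m).getLast! = s - (m : Int) * (k - 1) := by
  induction m with
  | zero => simp [pvSides]
  | succ n ih => simp [pvSides, List.range_succ] at *

lemma pvSides_succ (s k : Int) (m : Nat) :
    pvSides s k m ++ [(pvSides s k m).getLast! - k + 1] = pvSides s k (m + 1) := by
  rw [pvSides_getLast!]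
  simp [pvSides, List.range_succ]
  ring

lemma pvFold_eq (s k : Int) (cs : List Int) (m : Nat) :
    cs.foldl (fun ls _ => ls ++ [ls.getLast! - k + 1]) (pvSides s k m)
      = pvSides s k (m + cs.length) := by
  induction cs generalizing m with
  | nil => simp
  | cons c cs ih =>
      simp only [List.foldl_cons, pvSides_succ]
      rw [ih (m + 1)]
      congr 1
      simp
      omega

-- proof-only helper: the ascending list B's loop builds
def pvAscend (step : Int) (s : Int) (count : Nat) : List Int :=
  match count with
  | 0 => []
  | c + 1 => s :: pvAscend step (s + step) c

lemma pvAscend_succ (step s : Int) (c : Nat) :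
    pvAscend step s (c + 1) = s :: pvAscend step (s + step) c := rfl

lemma pvAscend_snoc (step : Int) (m : Nat) : ∀ (s : Int),
    pvAscend step s (m + 1) = pvAscend step s m ++ [s + (m : Int) * step] := by
  induction m with
  | zero => intro s; simp [pvAscend]
  | succ c ih =>
      intro s
      have h : s + step + (c : Int) * step = s + ((c + 1 : Nat) : Int) * step := by
        push_cast; ring
      rw [pvAscend_succ step s (c + 1), ih (s + step), h, pvAscend_succ step s c]
      simp [List.cons_append]

lemma pvFoldAsc (step : Int) (m : Nat) (acc : List Int) (s : Int) :
    (List.range m).foldl (fun (st : List Int × Int) _ => (st.1 ++ [st.2], st.2 + step)) (acc, s)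
      = (acc ++ pvAscend step s m, s + (m : Int) * step) := by
  induction m generalizing acc s with
  | zero => simp [pvAscend]
  | succ c ih =>
      rw [List.range_succ, List.foldl_append, ih, List.foldl_cons, List.foldl_nil]
      dsimp only
      rw [List.append_assoc, ← pvAscend_snoc]
      congr 1
      push_cast; ring

lemma pvAscend_reverse (s k : Int) (n : Nat) :
    (pvAscend (k - 1) (s - (n : Int) * (k - 1)) (n + 1)).reverse = pvSides s k n := by
  induction n with
  | zero => simp [pvAscend, pvSides]
  | succ m ih =>
      have harg : s - ((m + 1 : Nat) : Int) * (k - 1) + (k - 1) = s - (m : Int) * (k - 1) := by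
        push_cast; ring
      rw [pvAscend_succ, List.reverse_cons, harg, ih, ← pvSides_succ, pvSides_getLast!]
      congr 1
      push_cast; ring

-- ===== VERDICT =====
theorem calculate_layer_sides_spec : Claim_equal_calculate_layer_sides := by
  intro channels s k _ _
  unfold Spec_calculate_layer_sides calculate_layer_sides calculate_layer_sides_alt
  have h0 : [s] = pvSides s k 0 := by simp [pvSides]
  have hfold : channels.foldl (fun ls _ => ls ++ [ls.getLast! - k + 1]) [s]
      = pvSides s k channels.length := by
    rw [h0, pvFold_eq]; congr 1; omega
  simp only [hfold, pvSides_getLast!, pvFoldAsc, List.nil_append, pvAscend_reverse,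
    Prod.mk.injEq]
  exact ⟨trivial, by ring, trivial⟩
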